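-- pv_equiv track=rewrite | github.com/Rejean-McCormick/Grammatical_Framework_audit | app/audit/scanner.py | _process_gf_line
-- ===== SOURCE A (Python) =====
-- def _process_gf_line(line: str, in_block_comment: bool) -> tuple[str, str, bool]:
--     keep_chars: list[str] = []
--     masked_chars: list[str] = []
--
--     in_string = False
--     index = 0
--
--     while index < len(line):
--         ch = line[index]
--         next_ch = line[index + 1] if index + 1 < len(line) else "\0"
--
--         if in_block_comment:
--             if ch == "-" and next_ch == "}":
--                 in_block_comment = False
--                 keep_chars.extend([" ", " "])
--                 masked_chars.extend([" ", " "])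
--                 index += 2
--                 continue
--
--             keep_chars.append(" ")
--             masked_chars.append(" ")
--             index += 1
--             continue
--
--         if in_string:
--             if ch == "\\" and next_ch != "\0":
--                 keep_chars.extend([ch, next_ch])
--                 masked_chars.extend([" ", " "])
--                 index += 2
--                 continue
--
--             if ch == '"':
--                 in_string = False
--                 keep_chars.append('"')
--                 masked_chars.append('"')
--                 index += 1
--                 continue
--
--             keep_chars.append(ch)
--             masked_chars.append(" ")
--             index += 1
--             continue
--
--         if ch == "{" and next_ch == "-":
--             in_block_comment = True
--             keep_chars.extend([" ", " "])
--             masked_chars.extend([" ", " "])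
--             index += 2
--             continue
--
--         if ch == "-" and next_ch == "-":
--             remaining = len(line) - index
--             keep_chars.extend(" " * remaining)
--             masked_chars.extend(" " * remaining)
--             break
--
--         if ch == '"':
--             in_string = True
--             keep_chars.append('"')
--             masked_chars.append('"')
--             index += 1
--             continue
--
--         keep_chars.append(ch)
--         masked_chars.append(ch)
--         index += 1
--
--     return "".join(keep_chars), "".join(masked_chars), in_block_comment
-- ===== SOURCE B (Python) =====
-- def _process_gf_line(line: str, in_block_comment: bool) -> tuple[str, str, bool]:
--     # Span scanner: str.find jumps between delimiters instead of stepping char by char.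
--     keep: list[str] = []
--     masked: list[str] = []
--     n = len(line)
--     i = 0
--     state = 2 if in_block_comment else 0  # 0 = normal, 1 = string, 2 = block comment
--
--     while i < n:
--         if state == 0:
--             jb = line.find("{-", i)
--             jl = line.find("--", i)
--             jq = line.find('"', i)
--             cands = [j for j in (jb, jl, jq) if j != -1]
--             if not cands:
--                 keep.append(line[i:])
--                 masked.append(line[i:])
--                 break
--             j = min(cands)
--             keep.append(line[i:j])
--             masked.append(line[i:j])
--             if j == jb:
--                 keep.append("  ")
--                 masked.append("  ")
--                 i = j + 2
--                 state = 2
--             elif j == jl: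
--                 pad = " " * (n - j)
--                 keep.append(pad)
--                 masked.append(pad)
--                 break
--             else:
--                 keep.append('"')
--                 masked.append('"')
--                 i = j + 1
--                 state = 1
--         elif state == 1:
--             je = line.find("\\", i)
--             jq = line.find('"', i)
--             if je == -1 and jq == -1:
--                 keep.append(line[i:])
--                 masked.append(" " * (n - i))
--                 break
--             if je != -1 and (jq == -1 or je < jq):
--                 keep.append(line[i:je])
--                 masked.append(" " * (je - i))
--                 if je + 1 < n:
--                     keep.append(line[je:je + 2])
--                     masked.append("  ")
--                     i = je + 2
--                 else:
--                     # lone backslash at end of line: not an escape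
--                     keep.append("\\")
--                     masked.append(" ")
--                     break
--             else:
--                 keep.append(line[i:jq])
--                 masked.append(" " * (jq - i))
--                 keep.append('"')
--                 masked.append('"')
--                 i = jq + 1
--                 state = 0
--         else:
--             jc = line.find("-}", i)
--             if jc == -1:
--                 pad = " " * (n - i)
--                 keep.append(pad)
--                 masked.append(pad)
--                 i = n
--                 break
--             pad = " " * (jc + 2 - i)
--             keep.append(pad)
--             masked.append(pad)
--             i = jc + 2
--             state = 0
--
--     return "".join(keep), "".join(masked), state == 2
-- ===== Notes on version B (the rewrite author's own statement) =====
-- stated objective: faster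
-- what changed: Replaced the per-index character loop with a span scanner driven by str.find: it jumps to the earliest next delimiter ({-, --, " in normal mode; \ or " in a string; -} in a block comment) and copies/blanks whole spans at once.
import Mathlib
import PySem

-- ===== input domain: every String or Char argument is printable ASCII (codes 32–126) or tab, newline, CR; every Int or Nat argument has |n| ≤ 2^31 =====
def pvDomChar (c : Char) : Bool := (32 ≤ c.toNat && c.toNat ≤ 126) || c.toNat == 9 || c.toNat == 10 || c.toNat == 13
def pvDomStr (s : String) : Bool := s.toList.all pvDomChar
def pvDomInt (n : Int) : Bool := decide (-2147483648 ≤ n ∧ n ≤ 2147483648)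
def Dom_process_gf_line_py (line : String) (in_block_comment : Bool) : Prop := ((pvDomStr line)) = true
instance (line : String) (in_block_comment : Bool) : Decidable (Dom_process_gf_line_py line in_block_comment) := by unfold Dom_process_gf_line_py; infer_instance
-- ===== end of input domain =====

-- B replaces A's per-index character loop by a find-driven span scanner that jumps between delimiters and handles whole spans at once (measurably faster in Python); return values agree on the whole ASCII domain.

-- ===== PORT A =====
-- A's while loop over an index, transliterated as structural recursion on the remaining
-- suffix of the line; 'index += 2' becomes dropping two characters; next_ch's '\x00'
-- sentinel is kept literally (Dom excludes a real NUL in the line, as in Python).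
def pvALoop (cs : List Char) (in_block_comment : Bool) (in_string : Bool) :
    List Char × List Char × Bool :=
  match cs with
  | [] => ([], [], in_block_comment)
  | ch :: rest =>
    let next_ch := rest.headD '\x00'
    if in_block_comment then
      if ch = '-' ∧ next_ch = '}' then
        let r := pvALoop (rest.drop 1) false in_string
        (' ' :: ' ' :: r.1, ' ' :: ' ' :: r.2.1, r.2.2)
      else
        let r := pvALoop rest true in_string
        (' ' :: r.1, ' ' :: r.2.1, r.2.2)
    else if in_string then
      if ch = '\\' ∧ next_ch ≠ '\x00' then
        let r := pvALoop (rest.drop 1) in_block_comment true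
        (ch :: next_ch :: r.1, ' ' :: ' ' :: r.2.1, r.2.2)
      else if ch = '"' then
        let r := pvALoop rest in_block_comment false
        ('"' :: r.1, '"' :: r.2.1, r.2.2)
      else
        let r := pvALoop rest in_block_comment true
        (ch :: r.1, ' ' :: r.2.1, r.2.2)
    else if ch = '{' ∧ next_ch = '-' then
      let r := pvALoop (rest.drop 1) true in_string
      (' ' :: ' ' :: r.1, ' ' :: ' ' :: r.2.1, r.2.2)
    else if ch = '-' ∧ next_ch = '-' then
      -- 'break': blank the remaining characters and stop
      (List.replicate cs.length ' ', List.replicate cs.length ' ', in_block_comment)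
    else if ch = '"' then
      let r := pvALoop rest in_block_comment true
      ('"' :: r.1, '"' :: r.2.1, r.2.2)
    else
      let r := pvALoop rest in_block_comment in_string
      (ch :: r.1, ch :: r.2.1, r.2.2)
  termination_by cs.length
  decreasing_by all_goals (simp [List.length_drop]; try omega)

def process_gf_line_py (line : String) (in_block_comment : Bool) : String × String × Bool :=
  let r := pvALoop line.toList in_block_comment false
  (String.ofList r.1, String.ofList r.2.1, r.2.2)

-- ===== PORT B =====
-- B-side helpers: first occurrence of a two-char pattern / of one char in the suffix
-- (ports of Source B's line.find("..", i) calls, expressed on the remaining suffix).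
def pvFind2 (a b : Char) : List Char → Option Nat
  | x :: y :: rest =>
    if x = a ∧ y = b then some 0 else (pvFind2 a b (y :: rest)).map (· + 1)
  | _ => none

def pvFind1 (a : Char) (cs : List Char) : Option Nat := cs.findIdx? (· = a)

def pvOptMin : Option Nat → Option Nat → Option Nat
  | none, o => o
  | some a, none => some a
  | some a, some b => some (min a b)

theorem pvFind2_bound {a b : Char} {cs : List Char} {j : Nat}
    (h : pvFind2 a b cs = some j) : j + 2 ≤ cs.length := by
  induction cs generalizing j with
  | nil => simp [pvFind2] at h
  | cons x t ih =>
    match t with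
    | [] => simp [pvFind2] at h
    | y :: r =>
      rw [pvFind2] at h
      split at h
      · simp at h; simp [← h]
      · simp only [Option.map_eq_some_iff] at h
        obtain ⟨k, hk, rfl⟩ := h
        have := ih hk
        simp at this ⊢; omega

theorem pvFind1_bound {a : Char} {cs : List Char} {j : Nat}
    (h : pvFind1 a cs = some j) : j < cs.length :=
  List.findIdx?_eq_some_iff_findIdx_eq.mp h |>.1

theorem pvOptMin_bound {o1 o2 : Option Nat} {j n : Nat}
    (h : pvOptMin o1 o2 = some j)
    (h1 : ∀ k, o1 = some k → k < n) (h2 : ∀ k, o2 = some k → k < n) : j < n := by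
  cases o1 <;> cases o2 <;> simp [pvOptMin] at h
  · exact h ▸ h2 _ rfl
  · exact h ▸ h1 _ rfl
  · rcases h with rfl
    have := h1 _ rfl
    have := h2 _ rfl
    omega

-- B's while loop, transliterated on the remaining suffix: state 0 = normal,
-- 1 = inside string, 2 = inside block comment.
def pvBLoop (cs : List Char) (state : Nat) : List Char × List Char × Bool :=
  if hcs : cs = [] then ([], [], state == 2)
  else if state = 0 then
    let jb := pvFind2 '{' '-' cs
    let jl := pvFind2 '-' '-' cs
    let jq := pvFind1 '"' cs
    match hj : pvOptMin (pvOptMin jb jl) jq with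
    | none => (cs, cs, false)
    | some j =>
      let pre := cs.take j
      if jb = some j then
        let r := pvBLoop (cs.drop (j + 2)) 2
        (pre ++ ' ' :: ' ' :: r.1, pre ++ ' ' :: ' ' :: r.2.1, r.2.2)
      else if jl = some j then
        let pad := List.replicate (cs.length - j) ' '
        (pre ++ pad, pre ++ pad, false)
      else
        let r := pvBLoop (cs.drop (j + 1)) 1
        (pre ++ '"' :: r.1, pre ++ '"' :: r.2.1, r.2.2)
  else if state = 1 then
    let je := pvFind1 '\\' cs
    let jq := pvFind1 '"' cs
    match hje : je, hjq : jq with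
    | none, none => (cs, List.replicate cs.length ' ', false)
    | some k, jqv =>
      if jqv = none ∨ (∃ q, jqv = some q ∧ k < q) then
        if k + 1 < cs.length then
          let r := pvBLoop (cs.drop (k + 2)) 1
          (cs.take (k + 2) ++ r.1, List.replicate (k + 2) ' ' ++ r.2.1, r.2.2)
        else
          -- lone backslash at end of line: not an escape
          (cs.take k ++ ['\\'], List.replicate (k + 1) ' ', false)
      else
        match hq : jqv with
        | some q =>
          let r := pvBLoop (cs.drop (q + 1)) 0
          (cs.take q ++ '"' :: r.1, List.replicate q ' ' ++ '"' :: r.2.1, r.2.2)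
        | none => ([], [], false)  -- unreachable: jqv = none was handled above
    | none, some q =>
      let r := pvBLoop (cs.drop (q + 1)) 0
      (cs.take q ++ '"' :: r.1, List.replicate q ' ' ++ '"' :: r.2.1, r.2.2)
  else
    match hj : pvFind2 '-' '}' cs with
    | none => (List.replicate cs.length ' ', List.replicate cs.length ' ', true)
    | some j =>
      let pad := List.replicate (j + 2) ' '
      let r := pvBLoop (cs.drop (j + 2)) 0
      (pad ++ r.1, pad ++ r.2.1, r.2.2)
  termination_by cs.length
  decreasing_by
  · have hb : ∀ k, pvFind2 '{' '-' cs = some k → k < cs.length := by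
      intro k hk; have := pvFind2_bound hk; omega
    have hl : ∀ k, pvFind2 '-' '-' cs = some k → k < cs.length := by
      intro k hk; have := pvFind2_bound hk; omega
    have hq : ∀ k, pvFind1 '"' cs = some k → k < cs.length := fun k hk => pvFind1_bound hk
    have := pvOptMin_bound hj (fun k hk => pvOptMin_bound hk hb hl) hq
    simp [List.length_drop]; omega
  · have := pvOptMin_bound hj (fun k hk =>
      pvOptMin_bound hk (fun k hk => by have := pvFind2_bound hk; omega)
        (fun k hk => by have := pvFind2_bound hk; omega))
      (fun k hk => pvFind1_bound hk)
    simp [List.length_drop]; omega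
  · simp [List.length_drop]; omega
  · have := pvFind1_bound hje
    simp [List.length_drop]; omega
  · have := pvFind1_bound hjq
    simp [List.length_drop]; omega
  · have := pvFind2_bound hj
    simp [List.length_drop]; omega

def process_gf_line_py_alt (line : String) (in_block_comment : Bool) : String × String × Bool :=
  let r := pvBLoop line.toList (if in_block_comment then 2 else 0)
  (String.ofList r.1, String.ofList r.2.1, r.2.2)

-- ===== PRECONDITION & SPEC =====
def Spec_process_gf_line_py (line : String) (in_block_comment : Bool) (out : String × String × Bool) : Prop := out = process_gf_line_py_alt line in_block_comment
instance (line : String) (in_block_comment : Bool) (out : String × String × Bool) : Decidable (Spec_process_gf_line_py line in_block_comment out) := by unfold Spec_process_gf_line_py; infer_instance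

-- ===== CLAIM (what is proved, stated in full; the proofs are below) =====
def Claim_equal_process_gf_line_py : Prop := ∀ (line : String) (in_block_comment : Bool), Dom_process_gf_line_py line in_block_comment → Spec_process_gf_line_py line in_block_comment (process_gf_line_py line in_block_comment)

-- ===== LEMMAS AND PROOFS =====

-- small facts about the find helpers and pvOptMin
theorem pvFind2_cons_neg {a b c : Char} {rest : List Char}
    (h : ¬(c = a ∧ rest.headD '\x00' = b)) (hb : b ≠ '\x00') :
    pvFind2 a b (c :: rest) = (pvFind2 a b rest).map (· + 1) := by
  cases rest with
  | nil => simp [pvFind2]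
  | cons y r =>
    rw [pvFind2]
    rw [if_neg (by simpa using h)]

theorem pvFind2_cons_pos (a b : Char) (r : List Char) :
    pvFind2 a b (a :: b :: r) = some 0 := by
  simp [pvFind2]

theorem pvFind1_cons_neg {a c : Char} {rest : List Char} (h : c ≠ a) :
    pvFind1 a (c :: rest) = (pvFind1 a rest).map (· + 1) := by
  simp [pvFind1, List.findIdx?_cons, h]

theorem pvFind1_cons_pos (a : Char) (rest : List Char) :
    pvFind1 a (a :: rest) = some 0 := by
  simp [pvFind1, List.findIdx?_cons]

theorem pvOptMin_map (o1 o2 : Option Nat) :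
    pvOptMin (o1.map (· + 1)) (o2.map (· + 1)) = (pvOptMin o1 o2).map (· + 1) := by
  cases o1 <;> cases o2 <;> simp [pvOptMin] <;> omega

theorem pvOptMin_zero_left (o : Option Nat) : pvOptMin (some 0) o = some 0 := by
  cases o <;> simp [pvOptMin]

theorem pvOptMin_zero_right (o : Option Nat) : pvOptMin o (some 0) = some 0 := by
  cases o <;> simp [pvOptMin]

theorem pvMap_eq_succ {o : Option Nat} {j : Nat} :
    o.map (· + 1) = some (j + 1) ↔ o = some j := by
  cases o <;> simp

theorem pvBLoop_nil (s : Nat) : pvBLoop [] s = ([], [], s == 2) := by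
  rw [pvBLoop]; simp

theorem pvOptMin3_bound {jb jl jq : Option Nat} {j n : Nat}
    (hM : pvOptMin (pvOptMin jb jl) jq = some j)
    (h1 : ∀ k, jb = some k → k < n) (h2 : ∀ k, jl = some k → k < n)
    (h3 : ∀ k, jq = some k → k < n) : j < n :=
  pvOptMin_bound hM (fun k hk => pvOptMin_bound hk h1 h2) h3

-- state-0 step lemmas for pvBLoop
theorem pvB0_block (r : List Char) :
    pvBLoop ('{' :: '-' :: r) 0 =
      (' ' :: ' ' :: (pvBLoop r 2).1, ' ' :: ' ' :: (pvBLoop r 2).2.1, (pvBLoop r 2).2.2) := by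
  rw [pvBLoop, dif_neg (List.cons_ne_nil _ _), if_pos rfl]
  simp only []
  rw [pvFind2_cons_pos, pvOptMin_zero_left, pvOptMin_zero_left]
  simp

theorem pvB0_lcomment (r : List Char) :
    pvBLoop ('-' :: '-' :: r) 0 =
      (List.replicate (r.length + 2) ' ', List.replicate (r.length + 2) ' ', false) := by
  rw [pvBLoop, dif_neg (List.cons_ne_nil _ _), if_pos rfl]
  simp only []
  rw [pvFind2_cons_neg (by simp) (by decide), pvFind2_cons_pos,
    pvFind1_cons_neg (by decide), pvOptMin_zero_right, pvOptMin_zero_left]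
  simp

theorem pvB0_quote (rest : List Char) :
    pvBLoop ('"' :: rest) 0 =
      ('"' :: (pvBLoop rest 1).1, '"' :: (pvBLoop rest 1).2.1, (pvBLoop rest 1).2.2) := by
  rw [pvBLoop, dif_neg (List.cons_ne_nil _ _), if_pos rfl]
  simp only []
  rw [pvFind2_cons_neg (by simp) (by decide), pvFind2_cons_neg (by simp) (by decide),
    pvFind1_cons_pos, pvOptMin_map, pvOptMin_zero_right]
  simp

theorem pvB0_plain {c : Char} {rest : List Char} (hq : c ≠ '"')
    (hb : ¬(c = '{' ∧ rest.headD '\x00' = '-'))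
    (hl : ¬(c = '-' ∧ rest.headD '\x00' = '-')) :
    pvBLoop (c :: rest) 0 =
      (c :: (pvBLoop rest 0).1, c :: (pvBLoop rest 0).2.1, (pvBLoop rest 0).2.2) := by
  rw [pvBLoop, dif_neg (List.cons_ne_nil _ _), if_pos rfl]
  simp only []
  rw [pvFind2_cons_neg hb (by decide), pvFind2_cons_neg hl (by decide),
    pvFind1_cons_neg hq, pvOptMin_map, pvOptMin_map]
  cases hM : pvOptMin (pvOptMin (pvFind2 '{' '-' rest) (pvFind2 '-' '-' rest)) (pvFind1 '"' rest) with
  | none =>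
    simp only [Option.map_none]
    rcases rest with _ | ⟨y, r⟩
    · simp [pvBLoop]
    · conv_rhs => rw [pvBLoop, dif_neg (List.cons_ne_nil _ _), if_pos rfl]
      conv_rhs => simp only []
      conv_rhs => rw [hM]
  | some j =>
    have hjlen : j < rest.length := by
      refine pvOptMin3_bound hM ?_ ?_ ?_
      · intro k hk; have := pvFind2_bound hk; omega
      · intro k hk; have := pvFind2_bound hk; omega
      · intro k hk; exact pvFind1_bound hk
    have hrest : rest ≠ [] := by intro h; subst h; simp at hjlen
    simp only [Option.map_some]
    conv_rhs => rw [pvBLoop, dif_neg hrest, if_pos rfl]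
    conv_rhs => simp only []
    conv_rhs => rw [hM]
    simp only []
    by_cases hjb : pvFind2 '{' '-' rest = some j
    · rw [if_pos (pvMap_eq_succ.mpr hjb)]
      conv_rhs => rw [if_pos hjb]
      simp
    · rw [if_neg (fun h => hjb (pvMap_eq_succ.mp h))]
      conv_rhs => rw [if_neg hjb]
      by_cases hjl : pvFind2 '-' '-' rest = some j
      · rw [if_pos (pvMap_eq_succ.mpr hjl)]
        conv_rhs => rw [if_pos hjl]
        have hlen : (c :: rest).length - (j + 1) = rest.length - j := by simp
        simp [hlen]
      · rw [if_neg (fun h => hjl (pvMap_eq_succ.mp h))]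
        conv_rhs => rw [if_neg hjl]
        simp

-- state-1 step lemmas for pvBLoop
theorem pvB1_esc (y : Char) (r : List Char) :
    pvBLoop ('\\' :: y :: r) 1 =
      ('\\' :: y :: (pvBLoop r 1).1, ' ' :: ' ' :: (pvBLoop r 1).2.1, (pvBLoop r 1).2.2) := by
  rw [pvBLoop, dif_neg (List.cons_ne_nil _ _), if_neg (by decide), if_pos rfl]
  simp only []
  rw [pvFind1_cons_pos]
  by_cases hy : y = '"'
  · subst hy
    rw [pvFind1_cons_neg (by decide), pvFind1_cons_pos]
    simp
  · rw [pvFind1_cons_neg (by decide), pvFind1_cons_neg hy]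
    cases hq : pvFind1 '"' r with
    | none =>
      simp
    | some q =>
      simp

theorem pvB1_esc_end : pvBLoop ['\\'] 1 = (['\\'], [' '], false) := by
  rw [pvBLoop, dif_neg (List.cons_ne_nil _ _), if_neg (by decide), if_pos rfl]
  simp only []
  rw [pvFind1_cons_pos, pvFind1_cons_neg (by decide)]
  simp [pvFind1]

theorem pvB1_quote (rest : List Char) :
    pvBLoop ('"' :: rest) 1 =
      ('"' :: (pvBLoop rest 0).1, '"' :: (pvBLoop rest 0).2.1, (pvBLoop rest 0).2.2) := by
  rw [pvBLoop, dif_neg (List.cons_ne_nil _ _), if_neg (by decide), if_pos rfl]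
  simp only []
  rw [pvFind1_cons_neg (by decide), pvFind1_cons_pos]
  cases he : pvFind1 '\\' rest with
  | none => simp
  | some k =>
    simp

theorem pvB1_plain {c : Char} {rest : List Char} (he : c ≠ '\\') (hq : c ≠ '"') :
    pvBLoop (c :: rest) 1 =
      (c :: (pvBLoop rest 1).1, ' ' :: (pvBLoop rest 1).2.1, (pvBLoop rest 1).2.2) := by
  rw [pvBLoop, dif_neg (List.cons_ne_nil _ _), if_neg (by decide), if_pos rfl]
  simp only []
  rw [pvFind1_cons_neg he, pvFind1_cons_neg hq]
  cases hE : pvFind1 '\\' rest with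
  | none =>
    cases hQ : pvFind1 '"' rest with
    | none =>
      simp only [Option.map_none]
      rcases rest with _ | ⟨y, r⟩
      · simp [pvBLoop_nil]
      · conv_rhs => rw [pvBLoop, dif_neg (List.cons_ne_nil _ _), if_neg (by decide), if_pos rfl]
        conv_rhs => simp only []
        conv_rhs => rw [hE, hQ]
        simp [List.replicate_succ]
    | some q =>
      have hqlen : q < rest.length := pvFind1_bound hQ
      have hrest : rest ≠ [] := by intro h; subst h; simp at hqlen
      simp only [Option.map_none, Option.map_some]
      conv_rhs => rw [pvBLoop, dif_neg hrest, if_neg (by decide), if_pos rfl]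
      conv_rhs => simp only []
      conv_rhs => rw [hE, hQ]
      simp [List.replicate_succ]
  | some k =>
    have hklen : k < rest.length := pvFind1_bound hE
    have hrest : rest ≠ [] := by intro h; subst h; simp at hklen
    conv_rhs => rw [pvBLoop, dif_neg hrest, if_neg (by decide), if_pos rfl]
    conv_rhs => simp only []
    conv_rhs => rw [hE]
    cases hQ : pvFind1 '"' rest with
    | none =>
      simp only [Option.map_some, Option.map_none]
      rw [if_pos (Or.inl trivial)]
      conv_rhs => rw [if_pos (Or.inl trivial)]
      by_cases hk1 : k + 1 < rest.length
      · rw [if_pos (by simp; omega)]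
        conv_rhs => rw [if_pos hk1]
        simp [List.replicate_succ]
      · rw [if_neg (by simp; omega)]
        conv_rhs => rw [if_neg hk1]
        simp [List.replicate_succ]
    | some q =>
      simp only [Option.map_some]
      by_cases hkq : k < q
      · rw [if_pos (Or.inr ⟨q + 1, rfl, by omega⟩)]
        conv_rhs => rw [if_pos (Or.inr ⟨q, rfl, hkq⟩)]
        by_cases hk1 : k + 1 < rest.length
        · rw [if_pos (by simp; omega)]
          conv_rhs => rw [if_pos hk1]
          simp [List.replicate_succ]
        · rw [if_neg (by simp; omega)]
          conv_rhs => rw [if_neg hk1]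
          simp [List.replicate_succ]
      · rw [if_neg (by rintro (h | ⟨q', hq', hlt⟩) <;> simp_all <;> omega)]
        conv_rhs => rw [if_neg (by rintro (h | ⟨q', hq', hlt⟩) <;> simp_all <;> omega)]
        simp [List.replicate_succ]

-- state-2 step lemmas for pvBLoop
theorem pvB2_close (r : List Char) :
    pvBLoop ('-' :: '}' :: r) 2 =
      (' ' :: ' ' :: (pvBLoop r 0).1, ' ' :: ' ' :: (pvBLoop r 0).2.1, (pvBLoop r 0).2.2) := by
  rw [pvBLoop, dif_neg (List.cons_ne_nil _ _), if_neg (by decide), if_neg (by decide)]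
  simp only []
  rw [pvFind2_cons_pos]
  simp

theorem pvB2_plain {c : Char} {rest : List Char}
    (h : ¬(c = '-' ∧ rest.headD '\x00' = '}')) :
    pvBLoop (c :: rest) 2 =
      (' ' :: (pvBLoop rest 2).1, ' ' :: (pvBLoop rest 2).2.1, (pvBLoop rest 2).2.2) := by
  rw [pvBLoop, dif_neg (List.cons_ne_nil _ _), if_neg (by decide), if_neg (by decide)]
  simp only []
  rw [pvFind2_cons_neg h (by decide)]
  cases hF : pvFind2 '-' '}' rest with
  | none =>
    simp only [Option.map_none]
    rcases rest with _ | ⟨y, r⟩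
    · simp [pvBLoop_nil, List.replicate]
    · conv_rhs => rw [pvBLoop, dif_neg (List.cons_ne_nil _ _), if_neg (by decide), if_neg (by decide)]
      conv_rhs => simp only []
      conv_rhs => rw [hF]
      simp [List.replicate]
  | some j =>
    have hjlen : j + 2 ≤ rest.length := pvFind2_bound hF
    have hrest : rest ≠ [] := by intro h'; subst h'; simp at hjlen
    simp only [Option.map_some]
    conv_rhs => rw [pvBLoop, dif_neg hrest, if_neg (by decide), if_neg (by decide)]
    conv_rhs => simp only []
    conv_rhs => rw [hF]
    simp [List.replicate]

-- the main equivalence, by strong induction on the length of the remaining suffix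
theorem pv_main_n : ∀ (n : Nat) (cs : List Char), cs.length ≤ n → '\x00' ∉ cs →
    pvALoop cs false false = pvBLoop cs 0 ∧
    pvALoop cs false true = pvBLoop cs 1 ∧
    pvALoop cs true false = pvBLoop cs 2 := by
  intro n
  induction n with
  | zero =>
    intro cs hlen _
    have : cs = [] := List.length_eq_zero_iff.mp (Nat.le_zero.mp hlen)
    subst this
    refine ⟨?_, ?_, ?_⟩ <;> rw [pvALoop, pvBLoop_nil] <;> rfl
  | succ n ih =>
    intro cs hlen hz
    rcases cs with _ | ⟨c, rest⟩
    · refine ⟨?_, ?_, ?_⟩ <;> rw [pvALoop, pvBLoop_nil] <;> rfl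
    have hzc : c ≠ '\x00' := by intro h; exact hz (h ▸ List.mem_cons_self ..)
    have hzr : '\x00' ∉ rest := fun h => hz (List.mem_cons_of_mem _ h)
    have hlr : rest.length ≤ n := by simp at hlen; omega
    have ihr := ih rest hlr hzr
    refine ⟨?_, ?_, ?_⟩
    · -- state 0
      rw [pvALoop]
      simp only []
      rw [if_neg (by decide), if_neg (by decide)]
      by_cases hbc : c = '{' ∧ rest.headD '\x00' = '-'
      · obtain ⟨rfl, hnext⟩ := hbc
        rcases rest with _ | ⟨y, r⟩
        · simp at hnext
        simp only [List.headD_cons] at hnext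
        subst hnext
        rw [if_pos ⟨rfl, rfl⟩, pvB0_block]
        have := (ih r (by simp at hlen; omega) (fun h => hzr (List.mem_cons_of_mem _ h))).2.2
        simp [this]
      · rw [if_neg hbc]
        by_cases hlc : c = '-' ∧ rest.headD '\x00' = '-'
        · obtain ⟨rfl, hnext⟩ := hlc
          rcases rest with _ | ⟨y, r⟩
          · simp at hnext
          simp only [List.headD_cons] at hnext
          subst hnext
          rw [if_pos ⟨rfl, rfl⟩, pvB0_lcomment]
          simp [List.replicate]
        · rw [if_neg hlc]
          by_cases hqc : c = '"'
          · subst hqc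
            rw [if_pos rfl, pvB0_quote]
            simp [ihr.2.1]
          · rw [if_neg hqc, pvB0_plain hqc hbc hlc]
            simp [ihr.1]
    · -- state 1
      rw [pvALoop]
      simp only []
      rw [if_neg (by decide), if_pos trivial]
      by_cases hec : c = '\\' ∧ rest.headD '\x00' ≠ '\x00'
      · obtain ⟨rfl, hnext⟩ := hec
        rcases rest with _ | ⟨y, r⟩
        · simp at hnext
        rw [if_pos ⟨rfl, by simpa using hnext⟩, pvB1_esc]
        have := (ih r (by simp at hlen; omega) (fun h => hzr (List.mem_cons_of_mem _ h))).2.1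
        simp [this]
      · rw [if_neg hec]
        by_cases hqc : c = '"'
        · subst hqc
          rw [if_pos rfl, pvB1_quote]
          simp [ihr.1]
        · rw [if_neg hqc]
          by_cases hc : c = '\\'
          · subst hc
            have hnext : rest.headD '\x00' = '\x00' := by
              by_contra h; exact hec ⟨rfl, h⟩
            have hrest : rest = [] := by
              rcases rest with _ | ⟨y, r⟩
              · rfl
              · simp only [List.headD_cons] at hnext
                exact absurd (hnext ▸ List.mem_cons_self ..) hzr
            subst hrest
            rw [pvB1_esc_end]
            rw [pvALoop]
          · rw [pvB1_plain hc hqc]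
            simp [ihr.2.1]
    · -- state 2
      rw [pvALoop]
      simp only []
      rw [if_pos trivial]
      by_cases hcc : c = '-' ∧ rest.headD '\x00' = '}'
      · obtain ⟨rfl, hnext⟩ := hcc
        rcases rest with _ | ⟨y, r⟩
        · simp at hnext
        simp only [List.headD_cons] at hnext
        subst hnext
        rw [if_pos ⟨rfl, rfl⟩, pvB2_close]
        have := (ih r (by simp at hlen; omega) (fun h => hzr (List.mem_cons_of_mem _ h))).1
        simp [this]
      · rw [if_neg hcc, pvB2_plain hcc]
        simp [ihr.2.2]

theorem pv_main (cs : List Char) (hz : '\x00' ∉ cs) :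
    pvALoop cs false false = pvBLoop cs 0 ∧
    pvALoop cs false true = pvBLoop cs 1 ∧
    pvALoop cs true false = pvBLoop cs 2 :=
  pv_main_n cs.length cs le_rfl hz

-- ===== VERDICT (by name: the statement is the Claim_ definition above) =====
theorem process_gf_line_py_spec : Claim_equal_process_gf_line_py := by
  intro line bl hdom
  unfold Spec_process_gf_line_py process_gf_line_py process_gf_line_py_alt
  have hz : '\x00' ∉ line.toList := by
    intro h
    have := List.all_eq_true.mp hdom _ h
    simp [pvDomChar] at this
  have h := pv_main line.toList hz
  cases bl <;> simp [h.1, h.2.2]
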